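-- pv_equiv track=rewrite | github.com/Tsinana/cryptography | utils/GFTwoWorkers.py | findAllminP
-- ===== SOURCE A (Python) =====
-- def multP(polynomialA, polynomialB, mod = -1, ):
--   """Умножение двух полиномов. Умножение двух полиномов по модулю"""
--
--   iterator = 0
--   polynomialLastStep = 0
--
--   modLength = -1
--   if mod != -1:
--     modClone = mod
--     while modClone != 0:
--       modLength += 1
--       modClone >>= 1
--
--   while 1 << iterator <= polynomialB:
--     if polynomialB & 1 << iterator != 0:
--       polynomialLastStep = polynomialLastStep ^ polynomialA << iterator
--
--       if mod != -1 and polynomialLastStep >= 1 << modLength: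
--         polynomialLastStep = divP(polynomialLastStep, mod)[0]
--
--     iterator += 1
--
--   return polynomialLastStep
--
-- def divP(polynomial, divider):
--   """Деление полинома с остатком. Возвращает частное и остаток"""
--
--   if divider == 0:
--     raise ValueError("Делитель равен нулю")
--
--   iterator = 1
--   quotient = 0b0
--
--   dividerLength = -1
--   dividerClone = divider
--
--   while dividerClone != 0:
--     dividerLength += 1
--     dividerClone >>= 1
--
--   while 1 << (iterator + dividerLength) <= polynomial:
--     iterator += 1
--   iterator -= 1
--
--   while polynomial >= 1 << dividerLength:
--
--     while 1 << (iterator + dividerLength) > polynomial: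
--       iterator -= 1
--
--     polynomial ^= divider << iterator
--     quotient += 1 << iterator
--
--   return (polynomial, quotient)
--
-- def findAllminP(n, cycleClasses, mod, fieldEx):
--   minPs = []
--
--   newX = 1
--
--   for cycleClass in cycleClasses:
--     minP = None
--
--     for el in cycleClass:
--       if minP is None:
--         minP = [fieldEx[el], newX]
--       else:
--         for i in range(len(minP) - 1, 0, -1):
--           minP[i] = multP(minP[i], fieldEx[el], mod) ^ minP[i - 1]
--         minP[0] = multP(minP[0], fieldEx[el], mod)
--
--         minP.append(newX)
--
--     for i in range(1, len(minP)):
--       if(minP[i] != 0):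
--         minP[i] = minP[i] << i
--
--     ans = 0
--     for mp in minP:
--       ans ^= mp
--
--     minPs.append((cycleClass,ans))
--
--   return minPs
-- ===== SOURCE B (Python) =====
-- def multP(polynomialA, polynomialB, mod = -1, ):
--   iterator = 0
--   polynomialLastStep = 0
--   modLength = -1
--   if mod != -1:
--     modClone = mod
--     while modClone != 0:
--       modLength += 1
--       modClone >>= 1
--   while 1 << iterator <= polynomialB:
--     if polynomialB & 1 << iterator != 0:
--       polynomialLastStep = polynomialLastStep ^ polynomialA << iterator
--       if mod != -1 and polynomialLastStep >= 1 << modLength: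
--         polynomialLastStep = divP(polynomialLastStep, mod)[0]
--     iterator += 1
--   return polynomialLastStep
--
-- def divP(polynomial, divider):
--   if divider == 0:
--     raise ValueError("Делитель равен нулю")
--   iterator = 1
--   quotient = 0b0
--   dividerLength = -1
--   dividerClone = divider
--   while dividerClone != 0:
--     dividerLength += 1
--     dividerClone >>= 1
--   while 1 << (iterator + dividerLength) <= polynomial:
--     iterator += 1
--   iterator -= 1
--   while polynomial >= 1 << dividerLength:
--     while 1 << (iterator + dividerLength) > polynomial:
--       iterator -= 1
--     polynomial ^= divider << iterator
--     quotient += 1 << iterator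
--   return (polynomial, quotient)
--
-- def _coeff(rs, mod, t, j, memo):
--   """Coefficient of x**j in prod_{i<=t} (x + rs[i]), by top-down memoized
--   recursion on the Pascal-like recurrence c(t,j) = c(t-1,j)*rs[t] + c(t-1,j-1)."""
--   if j < 0 or j > t + 1:
--     return 0
--   if j == t + 1:
--     return 1
--   if t == 0:
--     return rs[0]
--   if (t, j) not in memo:
--     a = _coeff(rs, mod, t - 1, j, memo)
--     b = _coeff(rs, mod, t - 1, j - 1, memo)
--     memo[(t, j)] = multP(a, rs[t], mod) ^ b
--   return memo[(t, j)]
--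
-- def _cosetAns(cycleClass, mod, fieldEx):
--   rs = [fieldEx[el] for el in cycleClass]
--   memo = {}
--   ans = 0
--   for j in range(len(rs) + 1):
--     ans ^= _coeff(rs, mod, len(rs) - 1, j, memo) << j
--   return ans
--
-- def findAllminP(n, cycleClasses, mod, fieldEx):
--   return [(cc, _cosetAns(cc, mod, fieldEx)) for cc in cycleClasses]
-- ===== Notes on version B (the rewrite author's own statement) =====
-- stated objective: alternative
-- what changed: B replaces A's bottom-up in-place coefficient-list updates by top-down memoized recursion on the Pascal-like recurrence c(t,j) = c(t-1,j)*rs[t] XOR c(t-1,j-1), computing each final coefficient independently (no polynomial list is ever materialised) and XOR-packing it into the answer as it is produced.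
import Mathlib
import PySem

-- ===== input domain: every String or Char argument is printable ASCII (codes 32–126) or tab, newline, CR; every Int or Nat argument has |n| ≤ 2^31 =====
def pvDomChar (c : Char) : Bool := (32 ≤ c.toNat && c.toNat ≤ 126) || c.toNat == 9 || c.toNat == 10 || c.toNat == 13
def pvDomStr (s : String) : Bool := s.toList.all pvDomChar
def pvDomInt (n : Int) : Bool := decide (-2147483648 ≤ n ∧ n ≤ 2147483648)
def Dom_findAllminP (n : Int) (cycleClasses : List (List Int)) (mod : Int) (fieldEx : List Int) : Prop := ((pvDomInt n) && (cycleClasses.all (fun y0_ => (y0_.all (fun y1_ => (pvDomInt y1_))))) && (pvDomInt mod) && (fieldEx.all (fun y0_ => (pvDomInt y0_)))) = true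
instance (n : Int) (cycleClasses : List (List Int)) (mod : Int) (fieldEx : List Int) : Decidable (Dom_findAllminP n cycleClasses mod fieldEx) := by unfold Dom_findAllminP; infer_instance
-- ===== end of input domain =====

-- B computes each minimal-polynomial coefficient by top-down memoized recursion on the
-- recurrence c(t,j) = c(t-1,j)·rs[t] ⊕ c(t-1,j-1) and packs it immediately, instead of
-- A's bottom-up in-place coefficient-list updates (objective: alternative, same cost).

-- ===== PORT A =====
-- shared module helpers multP/divP (used verbatim by both Source A and Source B).
-- Python 'x << k' needs k ≥ 0 (ValueError otherwise); pyShl is exact for k ≥ 0, and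
-- k < 0 is reached only outside Pre_ (mod = 0 with a multi-element coset).
def pyShl (a k : Int) : Int := if k < 0 then 0 else a <<< k.toNat

-- 'while clone != 0: len += 1; clone >>= 1'  — at most 33 iterations on Dom for clone ≥ 0
-- (negative clone ≠ -1 loops forever in Python; only reachable outside Pre_), so fuel 64 is exact.
def bitLenLoop : Nat → Int → Int → Int
  | 0, len, _ => len
  | f + 1, len, clone => if clone ≠ 0 then bitLenLoop f (len + 1) (clone >>> 1) else len

-- divP's 'while 1 << (iterator + dividerLength) <= polynomial: iterator += 1'
def divUpLoop : Nat → Int → Int → Int → Int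
  | 0, _, _, it => it
  | f + 1, poly, dL, it =>
      if pyShl 1 (it + dL) ≤ poly then divUpLoop f poly dL (it + 1) else it

-- divP's inner 'while 1 << (iterator + dividerLength) > polynomial: iterator -= 1'
def divInnerLoop : Nat → Int → Int → Int → Int
  | 0, _, _, it => it
  | f + 1, poly, dL, it =>
      if poly < pyShl 1 (it + dL) then divInnerLoop f poly dL (it - 1) else it

-- divP's outer reduction loop; each pass clears the leading bit of polynomial, and on
-- every call reachable inside Pre_ all bit positions are < 128, so fuel 256 is exact.
def divOuterLoop : Nat → Int → Int → Int → Int → Int → Int × Int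
  | 0, _, _, poly, _, quot => (poly, quot)
  | f + 1, divider, dL, poly, it, quot =>
      if pyShl 1 dL ≤ poly then
        let it' := divInnerLoop 256 poly dL it
        divOuterLoop f divider dL (PySem.Int.bxor poly (pyShl divider it')) it'
          (quot + pyShl 1 it')
      else (poly, quot)

def divP (polynomial divider : Int) : Int × Int :=
  -- 'if divider == 0: raise ValueError' — divP is only called with divider = mod ≥ 1 inside Pre_
  let dL := bitLenLoop 64 (-1) divider
  let it := divUpLoop 256 polynomial dL 1 - 1
  divOuterLoop 256 divider dL polynomial it 0

-- multP's 'while 1 << iterator <= polynomialB' loop: iterator ≤ 32 on Dom, fuel 64 exact.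
def mulLoop : Nat → Int → Int → Int → Int → Nat → Int → Int
  | 0, _, _, _, _, _, pls => pls
  | f + 1, pA, pB, mod, mL, it, pls =>
      if ((1 : Int) <<< it) ≤ pB then
        let pls' :=
          if PySem.Int.band pB ((1 : Int) <<< it) ≠ 0 then
            let p := PySem.Int.bxor pls (pA <<< it)
            if mod ≠ -1 ∧ pyShl 1 mL ≤ p then (divP p mod).1 else p
          else pls
        mulLoop f pA pB mod mL (it + 1) pls'
      else pls

def multP (polynomialA polynomialB mod : Int) : Int :=
  let modLength := if mod ≠ -1 then bitLenLoop 64 (-1) mod else -1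
  mulLoop 64 polynomialA polynomialB mod modLength 0 0

-- A's 'for i in range(len(minP) - 1, 0, -1)' in-place update; the argument is the first
-- index processed (indices i, i-1, …, 1); all indices are in range, so getD/set are exact.
def innerLoopA (r mod : Int) : Nat → List Int → List Int
  | 0, l => l
  | i + 1, l =>
      innerLoopA r mod i
        (l.set (i + 1) (PySem.Int.bxor (multP (l.getD (i + 1) 0) r mod) (l.getD i 0)))

-- one iteration of A's 'else' branch (minP is not None): update in place, then append newX = 1
def stepA (mod r : Int) (l : List Int) : List Int :=
  let l1 := innerLoopA r mod (l.length - 1) l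
  (l1.set 0 (multP (l1.getD 0 0) r mod)) ++ [1]

-- A's inner 'for el in cycleClass' loop carrying minP (None = none);
-- fieldEx[el] raises IndexError out of range — excluded by Pre_, so getD 0 is exact there.
def minPLoopA (mod : Int) (fieldEx : List Int) (cc : List Int) : Option (List Int) :=
  cc.foldl
    (fun minP el =>
      let fe := (PySem.List.pyGet? fieldEx el).getD 0
      match minP with
      | none => some [fe, 1]
      | some l => some (stepA mod fe l))
    none

-- the body of A's shift loop 'if minP[i] != 0: minP[i] = minP[i] << i' (indices are in range)
def packStepA (l : List Int) (i : Int) : List Int :=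
  if l.getD i.toNat 0 ≠ 0 then l.set i.toNat (l.getD i.toNat 0 <<< i.toNat) else l

-- A's whole per-coset body: build minP, shift in place, XOR everything together
def cosetAnsA (mod : Int) (fieldEx : List Int) (cc : List Int) : Int :=
  -- 'len(minP)' with minP = None raises TypeError on an empty coset — excluded by Pre_
  let minP := (minPLoopA mod fieldEx cc).getD []
  -- 'for i in range(1, len(minP)): …'
  let minP' := (PySem.List.pyRange 1 (minP.length : Int) 1).foldl packStepA minP
  minP'.foldl (fun a mp => PySem.Int.bxor a mp) 0

def findAllminP (n : Int) (cycleClasses : List (List Int)) (mod : Int) (fieldEx : List Int) : List (List Int × Int) :=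
  cycleClasses.foldl (fun minPs cc => minPs ++ [(cc, cosetAnsA mod fieldEx cc)]) []

-- ===== PORT B =====
-- _coeff(rs, mod, t, j, memo): top-down memoized recursion; the memo dict is threaded
-- through in state-passing style ('if key not in memo: memo[key] = …; return memo[key]').
-- rs[t] is only reached with 1 ≤ t < len rs at every actual call, so pyGet?/getD is exact.
def coeffB (rs : List Int) (mod : Int) (t j : Int)
    (memo : PySem.Dict (Int × Int) Int) : Int × PySem.Dict (Int × Int) Int :=
  if h1 : j < 0 ∨ t + 1 < j then (0, memo)
  else if h2 : j = t + 1 then (1, memo)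
  else if h3 : t = 0 then ((PySem.List.pyGet? rs 0).getD 0, memo)
  else
    match memo.get? (t, j) with
    | some v => (v, memo)
    | none =>
        let p1 := coeffB rs mod (t - 1) j memo
        let p2 := coeffB rs mod (t - 1) (j - 1) p1.2
        let v := PySem.Int.bxor (multP p1.1 ((PySem.List.pyGet? rs t).getD 0) mod) p2.1
        (v, p2.2.insert (t, j) v)
termination_by t.toNat
decreasing_by
  all_goals (simp only [not_or, not_lt] at h1; omega)

-- _cosetAns: rs = [fieldEx[el] for el in cycleClass], then 'for j in range(len(rs)+1):
-- ans ^= _coeff(rs, mod, len(rs)-1, j, memo) << j' (j ≥ 0, so toNat is exact)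
def cosetAnsB (cc : List Int) (mod : Int) (fieldEx : List Int) : Int :=
  let rs := cc.map (fun el => (PySem.List.pyGet? fieldEx el).getD 0)
  ((PySem.List.pyRange 0 ((rs.length : Int) + 1) 1).foldl
      (fun (st : Int × PySem.Dict (Int × Int) Int) j =>
        let p := coeffB rs mod ((rs.length : Int) - 1) j st.2
        (PySem.Int.bxor st.1 (p.1 <<< j.toNat), p.2))
      (0, PySem.Dict.empty)).1

def findAllminP_alt (n : Int) (cycleClasses : List (List Int)) (mod : Int) (fieldEx : List Int) : List (List Int × Int) :=
  cycleClasses.map (fun cc => (cc, cosetAnsB cc mod fieldEx))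

-- ===== PRECONDITION & SPEC =====
-- Pre_ excludes only inputs where A does not return: an empty coset (TypeError on len(None)),
-- a coset element out of range of fieldEx (IndexError), and — when some multP call actually
-- runs, i.e. some coset has ≥ 2 elements — mod ≤ -2 (the mod-length loop never terminates),
-- or mod = 0 with a positive multiplicand fieldEx[el], el past a coset's head (ValueError: 1 << -1).
def Pre_findAllminP (n : Int) (cycleClasses : List (List Int)) (mod : Int) (fieldEx : List Int) : Prop :=
  (∀ cc ∈ cycleClasses, cc ≠ [] ∧ ∀ el ∈ cc, PySem.Raise.InRange fieldEx.length el) ∧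
  (mod = -1 ∨ 1 ≤ mod ∨ (∀ cc ∈ cycleClasses, cc.length ≤ 1) ∨
    (mod = 0 ∧ ∀ cc ∈ cycleClasses, ∀ el ∈ cc.drop 1, (PySem.List.pyGet? fieldEx el).getD 0 ≤ 0))

instance (n : Int) (cycleClasses : List (List Int)) (mod : Int) (fieldEx : List Int) : Decidable (Pre_findAllminP n cycleClasses mod fieldEx) := by unfold Pre_findAllminP; infer_instance

def pvWitness_findAllminP : Int × List (List Int) × Int × List Int :=
  (4, [[1, 2], [0]], 19, [1, 2, 4, 8, 3])

def Spec_findAllminP (n : Int) (cycleClasses : List (List Int)) (mod : Int) (fieldEx : List Int) (out : List (List Int × Int)) : Prop := out = findAllminP_alt n cycleClasses mod fieldEx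
instance (n : Int) (cycleClasses : List (List Int)) (mod : Int) (fieldEx : List Int) (out : List (List Int × Int)) : Decidable (Spec_findAllminP n cycleClasses mod fieldEx out) := by unfold Spec_findAllminP; infer_instance

-- ===== CLAIM (what is proved, stated in full; the proofs are below) =====
def Claim_equal_findAllminP : Prop := ∀ (n : Int) (cycleClasses : List (List Int)) (mod : Int) (fieldEx : List Int), Dom_findAllminP n cycleClasses mod fieldEx → Pre_findAllminP n cycleClasses mod fieldEx → Spec_findAllminP n cycleClasses mod fieldEx (findAllminP n cycleClasses mod fieldEx)

-- ===== LEMMAS AND PROOFS =====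

-- memo-free version of B's coefficient recurrence (proof-side specification of coeffB)
def coeffP (rs : List Int) (mod : Int) (t j : Int) : Int :=
  if h1 : j < 0 ∨ t + 1 < j then 0
  else if h2 : j = t + 1 then 1
  else if h3 : t = 0 then (PySem.List.pyGet? rs 0).getD 0
  else
    PySem.Int.bxor (multP (coeffP rs mod (t - 1) j) ((PySem.List.pyGet? rs t).getD 0) mod)
      (coeffP rs mod (t - 1) (j - 1))
termination_by t.toNat
decreasing_by
  all_goals (simp only [not_or, not_lt] at h1; omega)

-- a memo is good when every stored value is the corresponding coeffP value
def GoodMemo (rs : List Int) (mod : Int) (memo : PySem.Dict (Int × Int) Int) : Prop :=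
  ∀ t j v, memo.get? (t, j) = some v → v = coeffP rs mod t j

theorem goodMemo_empty (rs : List Int) (mod : Int) : GoodMemo rs mod PySem.Dict.empty := by
  intro t j v h
  rw [PySem.Dict.get?_empty] at h
  exact absurd h (by simp)

-- the memoized recursion returns coeffP and keeps the memo good
theorem coeffB_spec (rs : List Int) (mod : Int) : ∀ (f : Nat) (t j : Int)
    (memo : PySem.Dict (Int × Int) Int), t.toNat ≤ f → GoodMemo rs mod memo →
    (coeffB rs mod t j memo).1 = coeffP rs mod t j ∧ GoodMemo rs mod (coeffB rs mod t j memo).2 := by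
  intro f
  induction f with
  | zero =>
    intro t j memo hf hg
    rw [coeffB, coeffP]
    split_ifs with h1 h2 h3
    · exact ⟨rfl, hg⟩
    · exact ⟨rfl, hg⟩
    · exact ⟨rfl, hg⟩
    · exfalso
      simp only [not_or, not_lt] at h1
      omega
  | succ f ih =>
    intro t j memo hf hg
    rw [coeffB, coeffP]
    split_ifs with h1 h2 h3
    · exact ⟨rfl, hg⟩
    · exact ⟨rfl, hg⟩
    · exact ⟨rfl, hg⟩
    · have ht : 1 ≤ t := by simp only [not_or, not_lt] at h1; omega
      cases hget : memo.get? (t, j) with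
      | some v =>
        refine ⟨?_, hg⟩
        have := hg t j v hget
        rw [this, coeffP]
        split_ifs <;> first | rfl | (exfalso; omega)
      | none =>
        have h1' := ih (t - 1) j memo (by omega) hg
        have h2' := ih (t - 1) (j - 1) (coeffB rs mod (t - 1) j memo).2 (by omega) h1'.2
        simp only
        constructor
        · rw [h1'.1, h2'.1]
        · intro t' j' v hv
          rw [PySem.Dict.get?_insert] at hv
          by_cases hk : (t', j') = (t, j)
          · rw [if_pos hk] at hv
            cases hv
            have het : t' = t := congrArg Prod.fst hk
            have hej : j' = j := congrArg Prod.snd hk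
            rw [het, hej, h1'.1, h2'.1]
            conv_rhs => rw [coeffP]
            split_ifs <;> first | rfl | omega
          · rw [if_neg hk] at hv
            exact h2'.2 t' j' v hv

-- B's packing loop, with the memo threaded out: its first component is the memo-free fold
theorem foldB_eq (rs : List Int) (mod : Int) : ∀ (js : List Int) (a : Int)
    (memo : PySem.Dict (Int × Int) Int), GoodMemo rs mod memo →
    ((js.foldl
        (fun (st : Int × PySem.Dict (Int × Int) Int) j =>
          let p := coeffB rs mod ((rs.length : Int) - 1) j st.2
          (PySem.Int.bxor st.1 (p.1 <<< j.toNat), p.2))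
        (a, memo)).1
      = js.foldl
          (fun acc j => PySem.Int.bxor acc (coeffP rs mod ((rs.length : Int) - 1) j <<< j.toNat)) a)
  | [], a, memo, _ => rfl
  | j :: js, a, memo, hg => by
    simp only [List.foldl_cons]
    have h := coeffB_spec rs mod ((rs.length : Int) - 1).toNat ((rs.length : Int) - 1) j memo
      (le_refl _) hg
    rw [foldB_eq rs mod js _ _ h.2, h.1]

-- length of the in-place update loop's result
theorem innerLoopA_length (r mod : Int) : ∀ (i : Nat) (l : List Int),
    (innerLoopA r mod i l).length = l.length
  | 0, _ => rfl
  | i + 1, l => by rw [innerLoopA, innerLoopA_length r mod i]; simp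

-- pointwise characterisation of A's reverse-index in-place loop
theorem innerLoopA_getD (r mod : Int) : ∀ (i : Nat) (l : List Int) (j : Nat), i < l.length →
    (innerLoopA r mod i l).getD j 0 =
      if 1 ≤ j ∧ j ≤ i then
        PySem.Int.bxor (multP (l.getD j 0) r mod) (l.getD (j - 1) 0)
      else l.getD j 0
  | 0, l, j, _ => by rw [innerLoopA, if_neg (by omega)]
  | i + 1, l, j, h => by
    rw [innerLoopA,
      innerLoopA_getD r mod i _ j (by simp only [List.length_set]; omega)]
    have hset : ∀ (m : Nat),
        (l.set (i + 1) (PySem.Int.bxor (multP (l.getD (i + 1) 0) r mod) (l.getD i 0))).getD m 0 =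
          if i + 1 = m then PySem.Int.bxor (multP (l.getD (i + 1) 0) r mod) (l.getD i 0)
          else l.getD m 0 := by
      intro m
      simp only [List.getD_eq_getElem?_getD, List.getElem?_set]
      split_ifs with h1 <;> simp_all
    by_cases hj1 : 1 ≤ j ∧ j ≤ i
    · rw [if_pos hj1, if_pos ⟨hj1.1, by omega⟩, hset j, hset (j - 1),
        if_neg (by omega), if_neg (by omega)]
    · by_cases hj2 : j = i + 1
      · subst hj2
        rw [if_neg (by omega), if_pos ⟨by omega, le_refl _⟩, hset (i + 1), if_pos rfl]
        simp
      · rw [if_neg (by omega), if_neg (by omega), hset j, if_neg (by omega)]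

-- stepA grows the list by the appended leading 1
theorem stepA_length (mod r : Int) (l : List Int) : (stepA mod r l).length = l.length + 1 := by
  rw [stepA]
  simp [innerLoopA_length]

-- pointwise characterisation of one of A's in-place multiplication steps
theorem stepA_getD (mod r : Int) (l : List Int) (hne : l ≠ []) (k : Nat) :
    (stepA mod r l).getD k 0 =
      if k = l.length then 1
      else if k < l.length then
        (if k = 0 then multP (l.getD 0 0) r mod
         else PySem.Int.bxor (multP (l.getD k 0) r mod) (l.getD (k - 1) 0))
      else 0 := by
  have hn : 1 ≤ l.length := List.length_pos_iff.mpr hne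
  rw [stepA]
  set L1 := innerLoopA r mod (l.length - 1) l with hL1
  have hl1 : L1.length = l.length := innerLoopA_length r mod _ l
  set X := L1.set 0 (multP (L1.getD 0 0) r mod) with hX
  have hXlen : X.length = l.length := by rw [hX]; simp [hl1]
  have hXg : ∀ (m : Nat), X.getD m 0 =
      if m = 0 then multP (l.getD 0 0) r mod
      else if 1 ≤ m ∧ m ≤ l.length - 1 then
        PySem.Int.bxor (multP (l.getD m 0) r mod) (l.getD (m - 1) 0)
      else l.getD m 0 := by
    intro m
    by_cases hm : m = 0
    · subst hm
      have hg0 : L1.getD 0 0 = l.getD 0 0 := by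
        rw [hL1, innerLoopA_getD r mod _ l 0 (by omega), if_neg (by omega)]
      have h0 : (L1.set 0 (multP (L1.getD 0 0) r mod)).getD 0 0 = multP (L1.getD 0 0) r mod := by
        rw [List.getD_eq_getElem?_getD, List.getElem?_set, if_pos rfl,
          if_pos (by omega : (0 : Nat) < L1.length)]
        rfl
      rw [hX, if_pos rfl, h0, hg0]
    · have : X.getD m 0 = L1.getD m 0 := by
        rw [hX]
        simp only [List.getD_eq_getElem?_getD, List.getElem?_set]
        rw [if_neg (by omega)]
      rw [this, hL1, innerLoopA_getD r mod _ l m (by omega), if_neg hm]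
  by_cases hk1 : k = l.length
  · rw [if_pos hk1]
    have : (X ++ [1]).getD k 0 = 1 := by
      rw [List.getD_eq_getElem?_getD, hk1, ← hXlen, List.getElem?_concat_length]
      rfl
    exact this
  · rw [if_neg hk1]
    by_cases hk2 : k < l.length
    · rw [if_pos hk2]
      have : (X ++ [1]).getD k 0 = X.getD k 0 := by
        simp only [List.getD_eq_getElem?_getD]
        rw [List.getElem?_append_left (by omega : k < X.length)]
      rw [this, hXg k]
      by_cases hk0 : k = 0
      · rw [if_pos hk0, if_pos hk0]
      · rw [if_neg hk0, if_neg hk0, if_pos ⟨by omega, by omega⟩]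
    · rw [if_neg hk2]
      rw [List.getD_eq_getElem?_getD, List.getElem?_eq_none (by simp [hXlen]; omega)]
      rfl

-- the polynomial A has built after processing elements 0..t of the root list rs
def prefixPoly (rs : List Int) (mod : Int) : Nat → List Int
  | 0 => [(PySem.List.pyGet? rs 0).getD 0, 1]
  | t + 1 => stepA mod ((PySem.List.pyGet? rs ((t : Int) + 1)).getD 0) (prefixPoly rs mod t)

theorem prefixPoly_length (rs : List Int) (mod : Int) : ∀ (t : Nat),
    (prefixPoly rs mod t).length = t + 2
  | 0 => rfl
  | t + 1 => by rw [prefixPoly, stepA_length, prefixPoly_length rs mod t]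

theorem prefixPoly_ne_nil (rs : List Int) (mod : Int) (t : Nat) : prefixPoly rs mod t ≠ [] := by
  have := prefixPoly_length rs mod t
  intro h
  rw [h] at this
  simp at this

-- B's memo-free recurrence computes exactly the entries of A's iteratively built polynomial
theorem coeffP_eq_prefixPoly (rs : List Int) (mod : Int) : ∀ (t : Nat) (j : Int),
    coeffP rs mod (t : Int) j =
      if 0 ≤ j ∧ j ≤ (t : Int) + 1 then (prefixPoly rs mod t).getD j.toNat 0 else 0
  | 0, j => by
    rw [coeffP]
    simp only [Nat.cast_zero]
    by_cases h1 : j < 0 ∨ (0 : Int) + 1 < j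
    · rw [dif_pos h1, if_neg (by omega)]
    · rw [dif_neg h1, if_pos (by omega)]
      by_cases h2 : j = (0 : Int) + 1
      · rw [dif_pos h2, prefixPoly]
        have : j.toNat = 1 := by omega
        rw [this]
        rfl
      · rw [dif_neg h2, dif_pos trivial, prefixPoly]
        have : j.toNat = 0 := by omega
        rw [this]
        rfl
  | t + 1, j => by
    have hlen := prefixPoly_length rs mod t
    have hne := prefixPoly_ne_nil rs mod t
    have hstep := stepA_getD mod ((PySem.List.pyGet? rs ((t : Int) + 1)).getD 0)
      (prefixPoly rs mod t) hne
    have hPP : prefixPoly rs mod (t + 1)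
        = stepA mod ((PySem.List.pyGet? rs ((t : Int) + 1)).getD 0) (prefixPoly rs mod t) := rfl
    rw [coeffP]
    by_cases h1 : j < 0 ∨ ((t + 1 : Nat) : Int) + 1 < j
    · rw [dif_pos h1, if_neg (by omega)]
    · rw [dif_neg h1, if_pos (by omega), hPP]
      by_cases h2 : j = ((t + 1 : Nat) : Int) + 1
      · rw [dif_pos h2, hstep j.toNat,
          if_pos (show j.toNat = (prefixPoly rs mod t).length by omega)]
      · rw [dif_neg h2, dif_neg (show ¬((t + 1 : Nat) : Int) = 0 by push_cast; omega)]
        have hc : ((t + 1 : Nat) : Int) - 1 = (t : Int) := by push_cast; ring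
        have hc2 : ((t + 1 : Nat) : Int) = (t : Int) + 1 := by push_cast; ring
        rw [hc, hc2, coeffP_eq_prefixPoly rs mod t j, coeffP_eq_prefixPoly rs mod t (j - 1),
          if_pos (show 0 ≤ j ∧ j ≤ (t : Int) + 1 by omega)]
        rw [hstep j.toNat,
          if_neg (show ¬ j.toNat = (prefixPoly rs mod t).length by omega),
          if_pos (show j.toNat < (prefixPoly rs mod t).length by omega)]
        by_cases hj0 : j = 0
        · rw [if_pos (show j.toNat = 0 by omega),
            if_neg (show ¬ (0 ≤ j - 1 ∧ j - 1 ≤ (t : Int) + 1) by omega)]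
          subst hj0
          simp [PySem.Int.bxor_zero]
        · rw [if_neg (show ¬ j.toNat = 0 by omega),
            if_pos (show 0 ≤ j - 1 ∧ j - 1 ≤ (t : Int) + 1 by omega)]
          have : (j - 1).toNat = j.toNat - 1 := by omega
          rw [this]

-- prefixPoly only reads rs at indices 0..t
theorem prefixPoly_congr (mod : Int) : ∀ (t : Nat) (rs rs' : List Int),
    (∀ i : Nat, i ≤ t → rs[i]? = rs'[i]?) → prefixPoly rs mod t = prefixPoly rs' mod t
  | 0, rs, rs', h => by
    rw [prefixPoly, prefixPoly, PySem.List.pyGet?_zero, PySem.List.pyGet?_zero,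
      h 0 (by omega)]
  | t + 1, rs, rs', h => by
    rw [prefixPoly, prefixPoly,
      prefixPoly_congr mod t rs rs' (fun i hi => h i (by omega))]
    have hcast : ((t : Int) + 1) = ((t + 1 : Nat) : Int) := by push_cast; ring
    rw [hcast, PySem.List.pyGet?_natCast, PySem.List.pyGet?_natCast, h (t + 1) (le_refl _)]

-- A's left fold of in-place steps is prefixPoly over the mapped root list
theorem foldA_eq_prefixPoly (mod : Int) (feF : Int → Int) (c0 : Int) : ∀ (rest : List Int),
    rest.foldl (fun l el => stepA mod (feF el) l) [feF c0, 1]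
      = prefixPoly ((c0 :: rest).map feF) mod rest.length := by
  intro rest
  induction rest using List.reverseRecOn with
  | nil =>
    rw [List.foldl_nil]
    simp only [List.length_nil]
    rw [prefixPoly]
    simp [PySem.List.pyGet?_zero]
  | append_singleton rest e ih =>
    rw [List.foldl_append, List.foldl_cons, List.foldl_nil, ih]
    have hlen : (rest ++ [e]).length = rest.length + 1 := by simp
    rw [hlen, prefixPoly]
    have hmap : (c0 :: (rest ++ [e])).map feF = (c0 :: rest).map feF ++ [feF e] := by simp
    have hidx : (PySem.List.pyGet? ((c0 :: (rest ++ [e])).map feF)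
        ((rest.length : Int) + 1)).getD 0 = feF e := by
      rw [hmap]
      have : ((rest.length : Int) + 1) = (((c0 :: rest).map feF).length : Int) := by
        simp
      rw [this, PySem.List.pyGet?_append_length]
      rfl
    rw [hidx, prefixPoly_congr mod rest.length ((c0 :: rest).map feF)
      ((c0 :: (rest ++ [e])).map feF)
      (fun i hi => by
        rw [hmap, List.getElem?_append_left (by simp; omega)])]

-- A's element loop with its Option accumulator, once minP is not None
theorem optFold (mod : Int) (fieldEx : List Int) : ∀ (rest : List Int) (l0 : List Int),
    rest.foldl
      (fun minP el =>
        let fe := (PySem.List.pyGet? fieldEx el).getD 0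
        match minP with
        | none => some [fe, 1]
        | some l => some (stepA mod fe l))
      (some l0)
    = some (rest.foldl (fun l el => stepA mod ((PySem.List.pyGet? fieldEx el).getD 0) l) l0)
  | [], _ => rfl
  | _ :: rest, l0 => by
    simp only [List.foldl_cons]
    exact optFold mod fieldEx rest _

-- A's shift loop preserves the length
theorem packFold_length : ∀ (k : Nat) (l : List Int),
    ((PySem.List.pyRange 1 (k : Int) 1).foldl packStepA l).length = l.length
  | 0, l => by rw [PySem.List.pyRange_one_eq_nil (by omega)]; rfl
  | k + 1, l => by
    rcases Nat.eq_zero_or_pos k with hk | hk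
    · subst hk; rw [PySem.List.pyRange_one_eq_nil (by omega)]; rfl
    · rw [show ((k + 1 : Nat) : Int) = (k : Int) + 1 by push_cast; ring,
        PySem.List.pyRange_one_succ_right (by omega), List.foldl_append]
      simp only [List.foldl_cons, List.foldl_nil, packStepA]
      split_ifs <;> simp [packFold_length k l]

-- pointwise characterisation of A's shift loop
theorem packFold_getD : ∀ (k : Nat) (l : List Int), k ≤ l.length → ∀ (j : Nat),
    ((PySem.List.pyRange 1 (k : Int) 1).foldl packStepA l).getD j 0 =
      if 1 ≤ j ∧ j < k then l.getD j 0 <<< j else l.getD j 0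
  | 0, l, _, j => by rw [PySem.List.pyRange_one_eq_nil (by omega), if_neg (by omega)]; rfl
  | k + 1, l, hk, j => by
    rcases Nat.eq_zero_or_pos k with hk0 | hk0
    · subst hk0
      rw [PySem.List.pyRange_one_eq_nil (by omega), if_neg (by omega)]; rfl
    · rw [show ((k + 1 : Nat) : Int) = (k : Int) + 1 by push_cast; ring,
        PySem.List.pyRange_one_succ_right (by omega), List.foldl_append]
      simp only [List.foldl_cons, List.foldl_nil]
      have hklen : ((PySem.List.pyRange 1 (k : Int) 1).foldl packStepA l).length = l.length :=
        packFold_length k l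
      have hkk : ((PySem.List.pyRange 1 (k : Int) 1).foldl packStepA l).getD k 0 = l.getD k 0 := by
        rw [packFold_getD k l (by omega) k, if_neg (by omega)]
      have hset : ∀ (v : Int) (m : Nat),
          (((PySem.List.pyRange 1 (k : Int) 1).foldl packStepA l).set k v).getD m 0 =
            if k = m then v
            else ((PySem.List.pyRange 1 (k : Int) 1).foldl packStepA l).getD m 0 := by
        intro v m
        simp only [List.getD_eq_getElem?_getD, List.getElem?_set, hklen]
        split_ifs <;> simp_all
      rw [packStepA]
      simp only [Int.toNat_natCast, hkk]
      have hIH := packFold_getD k l (by omega)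
      by_cases hz : l.getD k 0 = 0
      · rw [if_neg (by simpa using hz), hIH j]
        by_cases hc : 1 ≤ j ∧ j < k
        · rw [if_pos hc, if_pos ⟨hc.1, by omega⟩]
        · rw [if_neg hc]
          by_cases hjk : j = k
          · subst hjk
            rw [if_pos ⟨by omega, by omega⟩, hz, Int.zero_shiftLeft]
          · rw [if_neg (by omega)]
      · rw [if_pos (by simpa using hz), hset, hIH j]
        by_cases hjk : k = j
        · rw [if_pos hjk, if_pos (by omega), hjk]
        · rw [if_neg hjk]
          by_cases hc : 1 ≤ j ∧ j < k
          · rw [if_pos hc, if_pos ⟨hc.1, by omega⟩]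
          · rw [if_neg hc, if_neg (by omega)]

-- A's shift-then-XOR packing equals the index fold over shifted entries of the same list
theorem packA_eq_indexFold (l : List Int) :
    ((PySem.List.pyRange 1 (l.length : Int) 1).foldl packStepA l).foldl
        (fun a mp => PySem.Int.bxor a mp) 0
      = (PySem.List.pyRange 0 (l.length : Int) 1).foldl
          (fun a j => PySem.Int.bxor a (l.getD j.toNat 0 <<< j.toNat)) 0 := by
  have hshift : (PySem.List.pyRange 1 (l.length : Int) 1).foldl packStepA l =
      l.zipIdx.map (fun p => p.1 <<< p.2) := by
    apply List.ext_getElem?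
    intro j
    by_cases hj : j < l.length
    · rw [List.getElem?_eq_getElem (by rw [packFold_length]; exact hj),
        List.getElem?_eq_getElem (by simp [List.length_zipIdx]; exact hj)]
      rw [← List.getD_eq_getElem _ _, packFold_getD l.length l (le_refl _) j]
      simp only [List.getElem_map, List.getElem_zipIdx]
      rcases Nat.eq_zero_or_pos j with hj0 | hj0
      · subst hj0
        rw [if_neg (by omega), List.getD_eq_getElem _ _ hj]
        simp [Int.shiftLeft_zero]
      · rw [if_pos ⟨hj0, hj⟩, List.getD_eq_getElem _ _ hj]
        simp
    · rw [List.getElem?_eq_none (by rw [packFold_length]; omega),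
        List.getElem?_eq_none (by simp [List.length_zipIdx]; omega)]
  rw [hshift]
  -- fold over the shifted list = fold over its index range
  have main : ∀ (m : List Int) (a : Int),
      (m.zipIdx.map (fun p => p.1 <<< p.2)).foldl (fun a mp => PySem.Int.bxor a mp) a
        = (PySem.List.pyRange 0 (m.length : Int) 1).foldl
            (fun a j => PySem.Int.bxor a (m.getD j.toNat 0 <<< j.toNat)) a := by
    intro m
    induction m using List.reverseRecOn with
    | nil => intro a; rfl
    | append_singleton m x ih =>
      intro a
      have hz : (m ++ [x]).zipIdx = m.zipIdx ++ [(x, m.length)] := by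
        simp [List.zipIdx_append]
      rw [hz, List.map_append, List.foldl_append, ih]
      have hrange : PySem.List.pyRange 0 (((m ++ [x]).length : Nat) : Int) 1 =
          PySem.List.pyRange 0 (m.length : Int) 1 ++ [(m.length : Int)] := by
        have : (((m ++ [x]).length : Nat) : Int) = (m.length : Int) + 1 := by simp
        rw [this, PySem.List.pyRange_one_succ_right (by omega)]
      rw [hrange, List.foldl_append]
      simp only [List.map_cons, List.map_nil, List.foldl_cons, List.foldl_nil]
      have hcongr : ∀ (a : Int), (PySem.List.pyRange 0 (m.length : Int) 1).foldl
            (fun a j => PySem.Int.bxor a (m.getD j.toNat 0 <<< j.toNat)) a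
          = (PySem.List.pyRange 0 (m.length : Int) 1).foldl
            (fun a j => PySem.Int.bxor a ((m ++ [x]).getD j.toNat 0 <<< j.toNat)) a := by
        intro a
        apply PySem.List.foldl_congr_mem
        intro acc j hjmem
        have hj := (PySem.List.mem_pyRange_one).1 hjmem
        have : (m ++ [x]).getD j.toNat 0 = m.getD j.toNat 0 := by
          simp only [List.getD_eq_getElem?_getD]
          rw [List.getElem?_append_left (by omega)]
        rw [this]
      rw [hcongr]
      have hlast : (m ++ [x]).getD (m.length : Int).toNat 0 = x := by
        simp only [Int.toNat_natCast, List.getD_eq_getElem?_getD]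
        rw [List.getElem?_concat_length]
        rfl
      rw [hlast]
      simp [Int.shiftLeft_natCast_right]
  exact main l 0

-- the per-coset answers agree on a nonempty coset
theorem cosetAns_eq (mod : Int) (fieldEx : List Int) (cc : List Int) (hne : cc ≠ []) :
    cosetAnsA mod fieldEx cc = cosetAnsB cc mod fieldEx := by
  rcases List.exists_cons_of_ne_nil hne with ⟨c0, rest, rfl⟩
  set feF : Int → Int := fun el => (PySem.List.pyGet? fieldEx el).getD 0 with hfeF
  set rs := (c0 :: rest).map feF with hrs
  have hrslen : rs.length = rest.length + 1 := by simp [hrs]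
  -- A side: the built polynomial is prefixPoly rs rest.length
  have hA : minPLoopA mod fieldEx (c0 :: rest) = some (prefixPoly rs mod rest.length) := by
    rw [minPLoopA, List.foldl_cons]
    rw [optFold mod fieldEx rest [feF c0, 1]]
    rw [foldA_eq_prefixPoly mod feF c0 rest]
  set P := prefixPoly rs mod rest.length with hP
  have hPlen : P.length = rest.length + 2 := prefixPoly_length rs mod rest.length
  -- B side: drop the memo, replace coeffP by entries of P
  have hB : cosetAnsB (c0 :: rest) mod fieldEx
      = (PySem.List.pyRange 0 ((rs.length : Int) + 1) 1).foldl
          (fun a j => PySem.Int.bxor a (P.getD j.toNat 0 <<< j.toNat)) 0 := by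
    rw [cosetAnsB]
    simp only [← hfeF, ← hrs]
    rw [foldB_eq rs mod _ 0 PySem.Dict.empty (goodMemo_empty rs mod)]
    apply PySem.List.foldl_congr_mem
    intro acc j hjmem
    have hj := (PySem.List.mem_pyRange_one).1 hjmem
    have hcast : (rs.length : Int) - 1 = (rest.length : Int) := by
      rw [hrslen]; push_cast; ring
    rw [hcast, coeffP_eq_prefixPoly rs mod rest.length j,
      if_pos (by constructor <;> omega), ← hP, Int.shiftLeft_natCast_right]
  rw [hB, cosetAnsA, hA]
  simp only [Option.getD_some]
  rw [packA_eq_indexFold P]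
  have : (P.length : Int) = (rs.length : Int) + 1 := by rw [hPlen, hrslen]; push_cast; ring
  rw [this]

theorem findAllminP_spec : Claim_equal_findAllminP := by
  unfold Claim_equal_findAllminP
  intro n cycleClasses mod fieldEx _ hpre
  unfold Spec_findAllminP findAllminP findAllminP_alt
  rw [PySem.List.foldl_append_singleton_eq_map (fun cc => (cc, cosetAnsA mod fieldEx cc)),
    List.nil_append]
  apply List.map_congr_left
  intro cc hcc
  rw [cosetAns_eq mod fieldEx cc (hpre.1 cc hcc).1]
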